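-- pv_equiv track=rewrite | github.com/pypi-data/pypi-mirror-97 | packages/napoleontoolbox/napoleontoolbox-2.88.tar.gz/napoleontoolbox-2.88/napoleontoolbox/signal/parameters_generator.py | generate_alpha_16_lo
-- ===== SOURCE A (Python) =====
-- def generate_alpha_16_lo(lookback_windows, contravariants, lags, up_thresholds):
--     parameters = []
--     for lookback_window in lookback_windows:
--         for up_threshold in up_thresholds:
--             for lag in lags:
--                 for contravariant in contravariants:
--                     if lag <= lookback_window/4 and lag >= 2:
--                         parameters.append({
--                             'lookback_window':lookback_window,
--                             'lag' : lag,
--                             'up_threshold': up_threshold,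
--                             'contravariant':contravariant
--                         })
--     return parameters
-- ===== SOURCE B (Python) =====
-- def generate_alpha_16_lo(lookback_windows, contravariants, lags, up_thresholds):
--     # Stage 1 (lazy, memoized): for each distinct lookback_window, the flat list of
--     # admissible (lag, contravariant) pairs, cached in a dict so duplicate windows
--     # never redo the filter or the cross product.
--     pair_table = {}
--     parameters = []
--     for lookback_window in lookback_windows:
--         if lookback_window not in pair_table:
--             pair_table[lookback_window] = [
--                 (lag, contravariant)
--                 for lag in lags
--                 if lag >= 2 and lag <= lookback_window / 4
--                 for contravariant in contravariants
--             ]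
--         pairs = pair_table[lookback_window]
--         # Stage 2: unfiltered 2-deep pass over thresholds x precomputed pair table.
--         for up_threshold in up_thresholds:
--             for lag, contravariant in pairs:
--                 parameters.append({
--                     'lookback_window': lookback_window,
--                     'lag': lag,
--                     'up_threshold': up_threshold,
--                     'contravariant': contravariant,
--                 })
--     return parameters
-- ===== Notes on version B (the rewrite author's own statement) =====
-- stated objective: alternative
-- what changed: Replaces A's 4-deep filtered nest by a staged algorithm: a memoized dict maps each distinct lookback_window to its flat (lag, contravariant) pair table built once (filter fused into the pair build), and the output is then emitted by an unfiltered 2-deep pass over up_thresholds x that table, so the per-row filter test and the rejected lag iterations disappear from the emission loop and duplicate windows reuse the cached table.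
import Mathlib
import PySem

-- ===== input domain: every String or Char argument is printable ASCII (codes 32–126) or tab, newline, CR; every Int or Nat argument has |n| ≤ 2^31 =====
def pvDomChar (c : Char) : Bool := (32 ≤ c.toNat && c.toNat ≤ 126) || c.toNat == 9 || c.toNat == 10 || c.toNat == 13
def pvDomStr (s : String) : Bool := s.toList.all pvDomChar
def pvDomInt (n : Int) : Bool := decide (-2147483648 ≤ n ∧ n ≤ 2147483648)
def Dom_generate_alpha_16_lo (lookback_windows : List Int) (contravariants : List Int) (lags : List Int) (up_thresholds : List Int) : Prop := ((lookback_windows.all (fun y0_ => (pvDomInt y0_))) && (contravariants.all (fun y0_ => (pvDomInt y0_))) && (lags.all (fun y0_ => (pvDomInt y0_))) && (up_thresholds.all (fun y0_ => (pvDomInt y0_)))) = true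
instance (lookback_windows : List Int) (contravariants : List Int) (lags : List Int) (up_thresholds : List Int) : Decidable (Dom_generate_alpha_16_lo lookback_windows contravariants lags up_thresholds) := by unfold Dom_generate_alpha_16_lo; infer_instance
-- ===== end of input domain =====

-- B replaces A's 4-deep filtered nest by a staged algorithm: a memoized dict caches, per distinct
-- lookback_window, the flat (lag, contravariant) pair table, and an unfiltered 2-deep pass over
-- up_thresholds × that table emits the rows (objective: alternative).

-- ===== PORT A =====
-- Python's `lag <= lookback_window/4` is float true division; on |int| ≤ 2^31 (Dom) both sides are
-- exact doubles, so it is exactly the integer relation `lag * 4 ≤ lookback_window`, used here.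
def generate_alpha_16_lo (lookback_windows : List Int) (contravariants : List Int) (lags : List Int) (up_thresholds : List Int) : List (List (String × Int)) :=
  lookback_windows.foldl (fun parameters lookback_window =>
    up_thresholds.foldl (fun parameters up_threshold =>
      lags.foldl (fun parameters lag =>
        contravariants.foldl (fun parameters contravariant =>
          if lag * 4 ≤ lookback_window ∧ 2 ≤ lag then
            parameters ++ [[("lookback_window", lookback_window), ("lag", lag),
                            ("up_threshold", up_threshold), ("contravariant", contravariant)]]
          else parameters) parameters) parameters) parameters) []

-- ===== PORT B =====
-- same float-division note as in port A: `lag <= lookback_window/4` = `lag * 4 ≤ lookback_window` on Dom.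
-- State of the loop over lookback_windows = (pair_table, parameters).
def generate_alpha_16_lo_alt (lookback_windows : List Int) (contravariants : List Int) (lags : List Int) (up_thresholds : List Int) : List (List (String × Int)) :=
  (lookback_windows.foldl
    (fun (st : PySem.Dict Int (List (Int × Int)) × List (List (String × Int))) lookback_window =>
      let pair_table :=
        if st.1.contains lookback_window then st.1
        else st.1.insert lookback_window
          (lags.flatMap (fun lag =>
            if 2 ≤ lag ∧ lag * 4 ≤ lookback_window then
              contravariants.map (fun contravariant => (lag, contravariant))
            else []))
      let pairs := pair_table.getD lookback_window []
      (pair_table,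
       up_thresholds.foldl (fun parameters up_threshold =>
         pairs.foldl (fun parameters p =>
           parameters ++ [[("lookback_window", lookback_window), ("lag", p.1),
                           ("up_threshold", up_threshold), ("contravariant", p.2)]]) parameters)
         st.2))
    (PySem.Dict.empty, [])).2

-- ===== PRECONDITION & SPEC =====
def Spec_generate_alpha_16_lo (lookback_windows : List Int) (contravariants : List Int) (lags : List Int) (up_thresholds : List Int) (out : List (List (String × Int))) : Prop := out = generate_alpha_16_lo_alt lookback_windows contravariants lags up_thresholds
instance (lookback_windows : List Int) (contravariants : List Int) (lags : List Int) (up_thresholds : List Int) (out : List (List (String × Int))) : Decidable (Spec_generate_alpha_16_lo lookback_windows contravariants lags up_thresholds out) := by unfold Spec_generate_alpha_16_lo; infer_instance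

-- ===== CLAIM (what is proved, stated in full; the proofs are below) =====
def Claim_equal_generate_alpha_16_lo : Prop := ∀ (lookback_windows : List Int) (contravariants : List Int) (lags : List Int) (up_thresholds : List Int), Dom_generate_alpha_16_lo lookback_windows contravariants lags up_thresholds → Spec_generate_alpha_16_lo lookback_windows contravariants lags up_thresholds (generate_alpha_16_lo lookback_windows contravariants lags up_thresholds)

-- ===== LEMMAS AND PROOFS =====

-- the pair table B caches for a given lookback_window
def pvPairs (contravariants lags : List Int) (lw : Int) : List (Int × Int) :=
  lags.flatMap (fun lag =>
    if 2 ≤ lag ∧ lag * 4 ≤ lw then contravariants.map (fun cv => (lag, cv)) else [])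

-- the row emitted for (lw, ut, lag, cv)
def pvRow (lw ut lag cv : Int) : List (String × Int) :=
  [("lookback_window", lw), ("lag", lag), ("up_threshold", ut), ("contravariant", cv)]

-- a fold whose step fixes the accumulator is the identity
lemma pv_foldl_id {α β : Type} (f : α → β → α) (h : ∀ a b, f a b = a) :
    ∀ (l : List β) (acc : α), l.foldl f acc = acc := by
  intro l
  induction l with
  | nil => intro acc; rfl
  | cons b bs ih => intro acc; rw [List.foldl_cons, h]; exact ih acc

-- when the condition fails, A's innermost contravariant loop is the identity on the accumulator
lemma pv_cv_id (lw ut lag : Int) (cvs : List Int) (acc : List (List (String × Int)))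
    (h : ¬ (lag * 4 ≤ lw ∧ 2 ≤ lag)) :
    cvs.foldl (fun parameters cv =>
      if lag * 4 ≤ lw ∧ 2 ≤ lag then parameters ++ [pvRow lw ut lag cv] else parameters) acc
    = acc :=
  pv_foldl_id _ (fun _ _ => if_neg h) cvs acc

-- A's two inner loops (lags × contravariants, filtered) append exactly pvPairs mapped to rows
lemma pv_A_inner (lw ut : Int) (cvs lags : List Int) (acc : List (List (String × Int))) :
    lags.foldl (fun parameters lag =>
      cvs.foldl (fun parameters cv =>
        if lag * 4 ≤ lw ∧ 2 ≤ lag then parameters ++ [pvRow lw ut lag cv] else parameters)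
        parameters) acc
    = acc ++ (pvPairs cvs lags lw).map (fun p => pvRow lw ut p.1 p.2) := by
  induction lags generalizing acc with
  | nil => simp [pvPairs]
  | cons lag ls ih =>
    simp only [List.foldl_cons, pvPairs, List.flatMap_cons, List.map_append, ← List.append_assoc]
    rw [← pvPairs]
    by_cases h : 2 ≤ lag ∧ lag * 4 ≤ lw
    · have h' : lag * 4 ≤ lw ∧ 2 ≤ lag := ⟨h.2, h.1⟩
      simp only [if_pos h, if_pos h', List.map_map]
      rw [show (cvs.foldl (fun parameters cv => parameters ++ [pvRow lw ut lag cv]) acc)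
            = acc ++ cvs.map (fun cv => pvRow lw ut lag cv) from
          PySem.List.foldl_append_singleton_eq_map ..]
      rw [ih]; rfl
    · have h' : ¬ (lag * 4 ≤ lw ∧ 2 ≤ lag) := fun hc => h ⟨hc.2, hc.1⟩
      simp only [if_neg h, List.map_nil, List.append_nil]
      rw [pv_cv_id lw ut lag cvs acc h']
      exact ih acc

-- A's whole per-window block equals B's 2-deep pass over pvPairs
lemma pv_block (lw : Int) (cvs lags uts : List Int) (acc : List (List (String × Int))) :
    uts.foldl (fun parameters ut =>
      lags.foldl (fun parameters lag =>
        cvs.foldl (fun parameters cv =>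
          if lag * 4 ≤ lw ∧ 2 ≤ lag then parameters ++ [pvRow lw ut lag cv] else parameters)
          parameters) parameters) acc
    = uts.foldl (fun parameters ut =>
        (pvPairs cvs lags lw).foldl (fun parameters p => parameters ++ [pvRow lw ut p.1 p.2])
          parameters) acc := by
  induction uts generalizing acc with
  | nil => rfl
  | cons ut uts ih =>
    simp only [List.foldl_cons]
    rw [pv_A_inner, ← PySem.List.foldl_append_singleton_eq_map]
    exact ih _

-- main loop: B's fold (carrying the memo dict, any dict whose entries are correct) equals A's fold
lemma pv_main (cvs lags uts : List Int) (lws : List Int)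
    (pt : PySem.Dict Int (List (Int × Int))) (acc : List (List (String × Int)))
    (hpt : ∀ k v, pt.get? k = some v → v = pvPairs cvs lags k) :
    (lws.foldl
      (fun (st : PySem.Dict Int (List (Int × Int)) × List (List (String × Int))) lw =>
        let pair_table :=
          if st.1.contains lw then st.1
          else st.1.insert lw
            (lags.flatMap (fun lag =>
              if 2 ≤ lag ∧ lag * 4 ≤ lw then cvs.map (fun cv => (lag, cv)) else []))
        let pairs := pair_table.getD lw []
        (pair_table,
         uts.foldl (fun parameters ut =>
           pairs.foldl (fun parameters p =>
             parameters ++ [[("lookback_window", lw), ("lag", p.1),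
                             ("up_threshold", ut), ("contravariant", p.2)]]) parameters)
           st.2))
      (pt, acc)).2
    = lws.foldl (fun parameters lw =>
        uts.foldl (fun parameters ut =>
          lags.foldl (fun parameters lag =>
            cvs.foldl (fun parameters cv =>
              if lag * 4 ≤ lw ∧ 2 ≤ lag then parameters ++ [pvRow lw ut lag cv] else parameters)
              parameters) parameters) parameters) acc := by
  induction lws generalizing pt acc with
  | nil => rfl
  | cons lw lws ih =>
    simp only [List.foldl_cons]
    have hinv : ∀ k v,
        (if pt.contains lw then pt
         else pt.insert lw
           (lags.flatMap (fun lag =>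
             if 2 ≤ lag ∧ lag * 4 ≤ lw then cvs.map (fun cv => (lag, cv)) else []))).get? k = some v →
        v = pvPairs cvs lags k := by
      intro k v hv
      by_cases hc : pt.contains lw
      · exact hpt k v (by simpa [hc] using hv)
      · rw [if_neg hc, PySem.Dict.get?_insert] at hv
        by_cases hk : k = lw
        · simp only [if_pos hk] at hv
          cases hv; rw [hk]; rfl
        · exact hpt k v (by simpa [hk] using hv)
    have hpairs :
        (if pt.contains lw then pt
         else pt.insert lw
           (lags.flatMap (fun lag =>
             if 2 ≤ lag ∧ lag * 4 ≤ lw then cvs.map (fun cv => (lag, cv)) else []))).getD lw []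
        = pvPairs cvs lags lw := by
      by_cases hc : pt.contains lw
      · rw [if_pos hc]
        have : (pt.get? lw).isSome := by
          rw [← PySem.Dict.contains_eq_isSome_get?]; exact hc
        obtain ⟨v, hv⟩ := Option.isSome_iff_exists.mp this
        rw [PySem.Dict.getD_eq_get?_getD, hv]
        exact hpt lw v hv
      · rw [if_neg hc, PySem.Dict.getD_insert_self]; rfl
    rw [pv_block, hpairs]
    simp only [pvRow]
    exact ih _ _ hinv

-- ===== VERDICT (by name: the statement is the Claim_ definition above) =====
theorem generate_alpha_16_lo_spec : Claim_equal_generate_alpha_16_lo := by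
  intro lws cvs lags uts _
  unfold Spec_generate_alpha_16_lo generate_alpha_16_lo generate_alpha_16_lo_alt
  rw [pv_main cvs lags uts lws PySem.Dict.empty []
      (fun k v hv => by simp [PySem.Dict.get?_empty] at hv)]
  rfl
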